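-- pv_equiv track=rewrite | github.com/lightjan2005/neetcode-submissions | Data Structures & Algorithms/check-if-a-number-is-majority-element-in-a-sorted-array/submission-1.py | isMajorityElement
-- ===== SOURCE A (Python) =====
-- from typing import List
--
-- def isMajorityElement(nums: List[int], target: int) -> bool:
--
--     def lowerBound(nums: List[int], target: int)-> int:
--
--         start = 0
--         end = len(nums)-1
--         index = len(nums)
--
--         while start <= end:
--             mid = (start + end)//2
--             if nums[mid] >= target:
--                 end = mid - 1
--                 index = mid
--             else:
--                 start = mid + 1
--
--         return index
--
--     def upperBound(nums: List[int], target: int)->int: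
--         start = 0
--         end = len(nums)-1
--         index = len(nums)
--
--         while start <= end:
--             mid = (start + end)//2
--             if nums[mid] > target:
--                 end = mid - 1
--                 index = mid
--             else:
--                 start = mid + 1
--         return index
--
--     firstIndex = lowerBound(nums, target)
--     lastIndex = upperBound(nums, target)
--     return lastIndex - firstIndex > len(nums)//2
-- ===== SOURCE B (Python) =====
-- def isMajorityElement(nums, target):
--     count = 0
--     for x in nums:
--         if x == target:
--             count += 1
--     return count > len(nums) // 2
-- ===== Notes on version B (the rewrite author's own statement) =====
-- stated objective: simpler
-- what changed: Replaced A's two hand-written binary searches (lower and upper bound) with a single linear pass that counts occurrences of target and compares the count with len(nums)//2.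
-- outside the precondition, e.g. on isMajorityElement([1, 0, 1], 1): A returns False, B returns True
import Mathlib
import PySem

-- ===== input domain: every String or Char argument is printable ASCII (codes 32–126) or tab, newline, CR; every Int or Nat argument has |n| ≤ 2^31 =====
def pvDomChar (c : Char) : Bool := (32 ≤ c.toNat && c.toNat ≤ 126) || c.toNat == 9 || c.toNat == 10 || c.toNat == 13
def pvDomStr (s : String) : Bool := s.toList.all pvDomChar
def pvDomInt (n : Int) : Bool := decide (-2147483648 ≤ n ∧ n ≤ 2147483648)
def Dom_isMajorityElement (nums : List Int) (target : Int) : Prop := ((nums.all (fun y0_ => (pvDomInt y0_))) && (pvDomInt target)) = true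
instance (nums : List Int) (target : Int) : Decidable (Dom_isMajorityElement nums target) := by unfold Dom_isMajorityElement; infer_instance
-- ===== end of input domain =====

-- B replaces A's two hand-written binary searches with a single linear counting pass (simpler; not faster).


-- ===== PORT A =====
-- while-loop of A's lowerBound, state (start, end, index).  nums[mid] is ported with
-- pyGetD _ _ 0: inside the loop 0 ≤ start ≤ mid ≤ end ≤ len-1 always holds, so the
-- index is in range and the default is never used (exact w.r.t. Python indexing here).
def lbLoop (nums : List Int) (target : Int) (start e index : Int) : Int :=
  if _h : start ≤ e then
    let mid := PySem.Int.floordiv (start + e) 2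
    if target ≤ PySem.List.pyGetD nums mid 0 then
      lbLoop nums target start (mid - 1) mid
    else
      lbLoop nums target (mid + 1) e index
  else index
termination_by (e + 1 - start).toNat
decreasing_by
  · have := PySem.Int.floordiv_two_mid_bounds _h
    omega
  · have := PySem.Int.floordiv_two_mid_bounds _h
    omega

-- while-loop of A's upperBound (same remark about pyGetD)
def ubLoop (nums : List Int) (target : Int) (start e index : Int) : Int :=
  if _h : start ≤ e then
    let mid := PySem.Int.floordiv (start + e) 2
    if target < PySem.List.pyGetD nums mid 0 then
      ubLoop nums target start (mid - 1) mid
    else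
      ubLoop nums target (mid + 1) e index
  else index
termination_by (e + 1 - start).toNat
decreasing_by
  · have := PySem.Int.floordiv_two_mid_bounds _h
    omega
  · have := PySem.Int.floordiv_two_mid_bounds _h
    omega

def isMajorityElement (nums : List Int) (target : Int) : Bool :=
  let firstIndex := lbLoop nums target 0 ((nums.length : Int) - 1) (nums.length : Int)
  let lastIndex := ubLoop nums target 0 ((nums.length : Int) - 1) (nums.length : Int)
  decide (lastIndex - firstIndex > PySem.Int.floordiv (nums.length : Int) 2)

-- ===== PORT B =====
-- 'for x in nums: if x == target: count += 1'
def countLoop (nums : List Int) (target : Int) (count : Int) : Int :=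
  match nums with
  | [] => count
  | x :: xs => countLoop xs target (if x = target then count + 1 else count)

def isMajorityElement_alt (nums : List Int) (target : Int) : Bool :=
  decide (countLoop nums target 0 > PySem.Int.floordiv (nums.length : Int) 2)

-- ===== PRECONDITION & SPEC =====
-- Pre_ excludes lists that are not partitioned around target (i.e. where some element ≥ target
-- precedes a later element < target, or some element > target precedes a later element ≤ target;
-- every sorted list is partitioned around every target): the function is specified for sorted
-- input, and on such order-broken input the values of A's binary-search bound arithmetic are
-- accidental (e.g. on ([1, 0, 1], 1) A returns False although target is a majority); B does the
-- natural thing (counts occurrences) there.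
def Pre_isMajorityElement (nums : List Int) (target : Int) : Prop :=
  nums.Pairwise (fun a b => (b < target → a < target) ∧ (b ≤ target → a ≤ target))
instance (nums : List Int) (target : Int) : Decidable (Pre_isMajorityElement nums target) := by
  unfold Pre_isMajorityElement; infer_instance

def pvWitness_isMajorityElement : List Int × Int := ([1, 2, 2, 2, 3], 2)

def Spec_isMajorityElement (nums : List Int) (target : Int) (out : Bool) : Prop := out = isMajorityElement_alt nums target
instance (nums : List Int) (target : Int) (out : Bool) : Decidable (Spec_isMajorityElement nums target out) := by unfold Spec_isMajorityElement; infer_instance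

-- ===== CLAIM (what is proved, stated in full; the proofs are below) =====
def Claim_equal_isMajorityElement : Prop := ∀ (nums : List Int) (target : Int), Dom_isMajorityElement nums target → Pre_isMajorityElement nums target → Spec_isMajorityElement nums target (isMajorityElement nums target)

-- ===== LEMMAS AND PROOFS =====

-- generic version of A's two loops, parameterised by the branch predicate
def gLoop (nums : List Int) (p : Int → Bool) (start e index : Int) : Int :=
  if _h : start ≤ e then
    let mid := PySem.Int.floordiv (start + e) 2
    if p (PySem.List.pyGetD nums mid 0) then
      gLoop nums p start (mid - 1) mid
    else
      gLoop nums p (mid + 1) e index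
  else index
termination_by (e + 1 - start).toNat
decreasing_by
  · have := PySem.Int.floordiv_two_mid_bounds _h
    omega
  · have := PySem.Int.floordiv_two_mid_bounds _h
    omega

theorem lbLoop_eq_g (nums : List Int) (target : Int) :
    ∀ start e index : Int,
      lbLoop nums target start e index = gLoop nums (fun x => decide (target ≤ x)) start e index := by
  intro start e index
  fun_induction lbLoop nums target start e index with
  | case1 s e i h mid hp ih =>
      rw [gLoop, dif_pos h]
      show _ = if (decide (target ≤ PySem.List.pyGetD nums mid 0)) = true then _ else _
      rw [if_pos (by simpa using hp)]
      exact ih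
  | case2 s e i h mid hp ih =>
      rw [gLoop, dif_pos h]
      show _ = if (decide (target ≤ PySem.List.pyGetD nums mid 0)) = true then _ else _
      rw [if_neg (by simpa using hp)]
      exact ih
  | case3 s e i h => rw [gLoop, dif_neg h]

theorem ubLoop_eq_g (nums : List Int) (target : Int) :
    ∀ start e index : Int,
      ubLoop nums target start e index = gLoop nums (fun x => decide (target < x)) start e index := by
  intro start e index
  fun_induction ubLoop nums target start e index with
  | case1 s e i h mid hp ih =>
      rw [gLoop, dif_pos h]
      show _ = if (decide (target < PySem.List.pyGetD nums mid 0)) = true then _ else _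
      rw [if_pos (by simpa using hp)]
      exact ih
  | case2 s e i h mid hp ih =>
      rw [gLoop, dif_pos h]
      show _ = if (decide (target < PySem.List.pyGetD nums mid 0)) = true then _ else _
      rw [if_neg (by simpa using hp)]
      exact ih
  | case3 s e i h => rw [gLoop, dif_neg h]

-- if the first k elements satisfy f and the rest do not, the filter has length k
theorem filter_len_boundary (f : Int → Bool) :
    ∀ (l : List Int) (k : Nat), k ≤ l.length →
      (∀ (j : Nat) (hj : j < l.length), j < k → f l[j] = true) →
      (∀ (j : Nat) (hj : j < l.length), k ≤ j → f l[j] = false) →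
      (l.filter f).length = k := by
  intro l
  induction l with
  | nil => intro k hk _ _; simp at hk ⊢; omega
  | cons x xs ih =>
    intro k hk h1 h2
    cases k with
    | zero =>
      have hx : f x = false := h2 0 (by simp) (Nat.le_refl 0)
      have := ih 0 (Nat.zero_le _) (by intro j hj hjk; omega)
        (fun j hj _ => by simpa using h2 (j + 1) (by simpa using Nat.succ_lt_succ hj) (by omega))
      simpa [List.filter, hx] using this
    | succ k' =>
      have hx : f x = true := h1 0 (by simp) (by omega)
      have := ih k' (by simpa using hk)
        (fun j hj hjk => by simpa using h1 (j + 1) (by simpa using Nat.succ_lt_succ hj) (by omega))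
        (fun j hj hjk => by simpa using h2 (j + 1) (by simpa using Nat.succ_lt_succ hj) (by omega))
      simp [List.filter, hx, this]

-- loop correctness under the binary-search invariant
theorem gLoop_count (nums : List Int) (p : Int → Bool)
    (mono : ∀ (i j : Nat) (hj : j < nums.length) (hij : i ≤ j), p (nums[i]'(by omega)) = true → p nums[j] = true) :
    ∀ (n : Nat) (start e index : Int), (e + 1 - start).toNat ≤ n →
      0 ≤ start → start ≤ index → index ≤ (nums.length : Int) → e = index - 1 →
      (∀ (j : Nat) (hj : j < nums.length), (j : Int) < start → p nums[j] = false) →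
      (∀ (j : Nat) (hj : j < nums.length), index ≤ (j : Int) → p nums[j] = true) →
      gLoop nums p start e index = ((nums.filter (fun x => !p x)).length : Int) := by
  intro n
  induction n using Nat.strong_induction_on with
  | _ n IH =>
    intro start e index hn h0 hsi hil he inv1 inv2
    rw [gLoop]
    by_cases hse : start ≤ e
    · rw [dif_pos hse]
      obtain ⟨hm1, hm2⟩ := PySem.Int.floordiv_two_mid_bounds hse
      set mid := PySem.Int.floordiv (start + e) 2 with hmid
      have hmr : 0 ≤ mid ∧ mid < (nums.length : Int) := by omega
      have hget : PySem.List.pyGetD nums mid 0 = nums[mid.toNat]'(by omega) :=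
        PySem.List.pyGetD_eq_getElem _ _ hmr.1 hmr.2
      by_cases hp : p (PySem.List.pyGetD nums mid 0) = true
      · rw [if_pos hp]
        have hpm : p (nums[mid.toNat]'(by omega)) = true := by rw [← hget]; exact hp
        exact IH (mid - start).toNat (by omega) start (mid - 1) mid (by omega)
          h0 hm1 (by omega) (by ring) inv1
          (by
            intro j hj hmj
            by_cases hji : index ≤ (j : Int)
            · exact inv2 j hj hji
            · exact mono mid.toNat j hj (by omega) hpm)
      · rw [if_neg hp]
        have hpm : p (nums[mid.toNat]'(by omega)) = false := by
          rw [← hget]; exact Bool.eq_false_iff.mpr hp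
        exact IH (e - mid).toNat (by omega) (mid + 1) e index (by omega)
          (by omega) (by omega) hil he
          (by
            intro j hj hjm
            by_cases hjs : (j : Int) < start
            · exact inv1 j hj hjs
            · -- start ≤ j ≤ mid: if p held at j, mono would force it at mid
              cases hpj : p nums[j] with
              | false => rfl
              | true =>
                have := mono j mid.toNat (by omega) (by omega) hpj
                rw [hpm] at this; exact absurd this (by simp))
          inv2
    · rw [dif_neg hse]
      -- start = index; first index elements fail p, the rest satisfy it
      have hstart : start = index := by omega
      have hlen : index.toNat ≤ nums.length := by omega
      have := filter_len_boundary (fun x => !p x) nums index.toNat hlen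
        (by
          intro j hj hjk
          have := inv1 j hj (by omega)
          simp [this])
        (by
          intro j hj hjk
          have := inv2 j hj (by omega)
          simp [this])
      rw [this]; omega

theorem countLoop_eq (nums : List Int) (target : Int) :
    ∀ c : Int, countLoop nums target c = c + ((nums.filter (fun x => decide (x = target))).length : Int) := by
  induction nums with
  | nil => intro c; simp [countLoop]
  | cons x xs ih =>
    intro c
    by_cases hx : x = target <;> simp [countLoop, hx, ih] <;> omega

theorem filter_le_lt_split (nums : List Int) (target : Int) :
    ((nums.filter (fun x => !decide (target < x))).length : Int) =
      ((nums.filter (fun x => !decide (target ≤ x))).length : Int) +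
        ((nums.filter (fun x => decide (x = target))).length : Int) := by
  induction nums with
  | nil => simp
  | cons x xs ih =>
    rcases lt_trichotomy x target with h | h | h
    · simp [List.filter, show ¬ target < x by omega, show ¬ target ≤ x by omega,
        show ¬ x = target by omega, ih]
      omega
    · subst h
      simp [List.filter, ih]
      omega
    · simp [List.filter, h, show target ≤ x by omega, show ¬ x = target by omega, ih]

-- ===== VERDICT (by name: the statement is the Claim_ definition above) =====
theorem isMajorityElement_spec : Claim_equal_isMajorityElement := by
  intro nums target _hdom hpre
  unfold Spec_isMajorityElement isMajorityElement isMajorityElement_alt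
  have hpair := List.pairwise_iff_getElem.mp hpre
  have hlb := gLoop_count nums (fun x => decide (target ≤ x))
    (by
      intro i j hj hij hp
      simp only [decide_eq_true_iff] at *
      rcases Nat.lt_or_ge i j with h | h
      · by_contra hc
        push_neg at hc
        exact absurd ((hpair i j (by omega) hj h).1 hc) (by omega)
      · have : i = j := by omega
        subst this; exact hp)
    (((nums.length : Int) - 1) + 1 - 0).toNat 0 ((nums.length : Int) - 1) (nums.length : Int)
    (le_refl _) (le_refl _) (by omega) (le_refl _) (by ring_nf)
    (by intro j hj hjs; omega)
    (by intro j hj hji; omega)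
  have hub := gLoop_count nums (fun x => decide (target < x))
    (by
      intro i j hj hij hp
      simp only [decide_eq_true_iff] at *
      rcases Nat.lt_or_ge i j with h | h
      · by_contra hc
        push_neg at hc
        exact absurd ((hpair i j (by omega) hj h).2 hc) (by omega)
      · have : i = j := by omega
        subst this; exact hp)
    (((nums.length : Int) - 1) + 1 - 0).toNat 0 ((nums.length : Int) - 1) (nums.length : Int)
    (le_refl _) (le_refl _) (by omega) (le_refl _) (by ring_nf)
    (by intro j hj hjs; omega)
    (by intro j hj hji; omega)
  simp only [lbLoop_eq_g, ubLoop_eq_g, hlb, hub, countLoop_eq]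
  have hsplit := filter_le_lt_split nums target
  rw [decide_eq_decide]
  omega
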